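-- pv_equiv track=rewrite | github.com/Irlet/Python_SelfTraining | Fun_with_numbers.py | get_max_common_element
-- ===== SOURCE A (Python) =====
-- def get_max_common_element(first_list, second_list):
--     """Select common elements from both lists and return one with the max value.
--        :raises ValueError: if any of the input lists are empty.
--        Error message: 'Input lists cannot be empty'
--        :raises ValueError: if there are no common elements.
--        Error message: 'There are no common elements' """
--
--     common_list = []
--     if first_list == [] or second_list == []:
--         raise ValueError('Input lists cannot be empty')
--     for element in first_list:
--         if element in second_list:
--             common_list.append(element)
--     if common_list == []:
--         raise ValueError('There are no common elements')
--     n = len(common_list)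
--     for i in range(n):
--         for j in range(i+1, n):
--             if common_list[i] < common_list[j]:
--                 common_list[i], common_list[j] = common_list[j], common_list[i]
--
--     return common_list[0]
-- ===== SOURCE B (Python) =====
-- def get_max_common_element(first_list, second_list):
--     """Select common elements from both lists and return one with the max value.
--        :raises ValueError: if any of the input lists are empty.
--        :raises ValueError: if there are no common elements."""
--     if first_list == [] or second_list == []:
--         raise ValueError('Input lists cannot be empty')
--     seconds = set(second_list)
--     best = None
--     for x in first_list:
--         if x in seconds:
--             if best is None or x > best:
--                 best = x
--     if best is None:
--         raise ValueError('There are no common elements')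
--     return best
-- ===== Notes on version B (the rewrite author's own statement) =====
-- stated objective: faster
-- what changed: Replaces A's build-a-common-list-then-selection-sort two-phase algorithm by a single pass over first_list keeping a running maximum, with membership tested against a set built once from second_list.
import Mathlib
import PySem

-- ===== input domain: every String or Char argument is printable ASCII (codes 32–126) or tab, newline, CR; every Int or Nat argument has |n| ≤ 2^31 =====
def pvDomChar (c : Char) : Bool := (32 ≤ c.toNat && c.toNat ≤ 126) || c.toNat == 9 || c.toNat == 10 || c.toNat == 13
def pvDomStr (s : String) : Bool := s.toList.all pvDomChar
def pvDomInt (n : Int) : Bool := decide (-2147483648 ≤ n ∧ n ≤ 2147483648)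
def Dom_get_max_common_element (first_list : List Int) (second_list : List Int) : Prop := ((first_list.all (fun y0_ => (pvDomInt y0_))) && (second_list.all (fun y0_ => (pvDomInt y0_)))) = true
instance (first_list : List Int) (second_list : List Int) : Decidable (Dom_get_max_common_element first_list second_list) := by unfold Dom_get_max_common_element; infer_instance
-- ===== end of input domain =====

-- B replaces A's build-then-selection-sort (O(n*m + c^2)) by one running-max pass with a set
-- for membership (O(n + m)); equal on all inputs where A returns (Pre_ excludes A's ValueErrors,
-- on which B raises the same errors).

-- ===== PORT A =====
-- one body of the inner selection-sort loop: if common_list[i] < common_list[j]: swap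
def gmceSwapStep (l : List Int) (i j : Nat) : List Int :=
  if l.getD i 0 < l.getD j 0 then (l.set i (l.getD j 0)).set j (l.getD i 0) else l

def get_max_common_element (first_list : List Int) (second_list : List Int) : Int :=
  if first_list = [] ∨ second_list = [] then 0  -- Python: raise ValueError (excluded by Pre_)
  else
    let common_list := first_list.foldl (fun acc e => if e ∈ second_list then acc ++ [e] else acc) []
    if common_list = [] then 0  -- Python: raise ValueError (excluded by Pre_)
    else
      let n := common_list.length
      let sorted := (List.range n).foldl
        (fun l i => (List.range' (i+1) (n - (i+1))).foldl (fun l j => gmceSwapStep l i j) l)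
        common_list
      sorted.getD 0 0  -- common_list[0]; in range since the list is nonempty

-- ===== PORT B =====
-- loop body of B: 'if x in seconds: if best is None or x > best: best = x'
def gmceBStep (seconds : PySem.Set Int) (best : Option Int) (x : Int) : Option Int :=
  if seconds.contains x then
    match best with
    | none => some x
    | some m => if x > m then some x else best
  else best

def get_max_common_element_alt (first_list : List Int) (second_list : List Int) : Int :=
  if first_list = [] ∨ second_list = [] then 0  -- Python: raise ValueError (excluded by Pre_)
  else
    let seconds := PySem.Set.ofList second_list
    let best := first_list.foldl (gmceBStep seconds) (none : Option Int)
    match best with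
    | some m => m
    | none => 0  -- Python: raise ValueError (excluded by Pre_)

-- ===== PRECONDITION & SPEC =====
-- Pre_ excludes exactly the inputs on which the Python A raises ValueError
-- (an empty input list, or no common element); B raises the same errors there.
def Pre_get_max_common_element (first_list : List Int) (second_list : List Int) : Prop :=
  first_list ≠ [] ∧ second_list ≠ [] ∧ ∃ x ∈ first_list, x ∈ second_list
instance (first_list : List Int) (second_list : List Int) : Decidable (Pre_get_max_common_element first_list second_list) := by unfold Pre_get_max_common_element; infer_instance

def pvWitness_get_max_common_element : List Int × List Int := ([1, 3, 2], [2, 3, 5])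

def Spec_get_max_common_element (first_list : List Int) (second_list : List Int) (out : Int) : Prop := out = get_max_common_element_alt first_list second_list
instance (first_list : List Int) (second_list : List Int) (out : Int) : Decidable (Spec_get_max_common_element first_list second_list out) := by unfold Spec_get_max_common_element; infer_instance

-- ===== CLAIM (what is proved, stated in full; the proofs are below) =====
def Claim_equal_get_max_common_element : Prop := ∀ (first_list : List Int) (second_list : List Int), Dom_get_max_common_element first_list second_list → Pre_get_max_common_element first_list second_list → Spec_get_max_common_element first_list second_list (get_max_common_element first_list second_list)

-- ===== LEMMAS AND PROOFS =====

-- A's first loop builds exactly the filter of first_list by membership in second_list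
theorem gmce_filter (sl : List Int) :
    ∀ (fl : List Int) (acc : List Int),
      fl.foldl (fun acc e => if e ∈ sl then acc ++ [e] else acc) acc
        = acc ++ fl.filter (fun e => decide (e ∈ sl)) := by
  intro fl
  induction fl with
  | nil => simp [List.foldl]
  | cons x t ih =>
    intro acc
    simp only [List.foldl, List.filter]
    by_cases hx : x ∈ sl
    · simp [hx, ih]
    · simp [hx, ih]

theorem gmce_step_notmem (sl : List Int) (x : Int) (hx : x ∉ sl) (b : Option Int) :
    gmceBStep (PySem.Set.ofList sl) b x = b := by
  have hc : (PySem.Set.ofList sl).contains x = false := by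
    simp [PySem.Set.mem_ofList, hx]
  unfold gmceBStep
  rw [hc]; simp

theorem gmce_step_mem_some (sl : List Int) (x : Int) (hx : x ∈ sl) (m : Int) :
    gmceBStep (PySem.Set.ofList sl) (some m) x = some (max m x) := by
  have hc : (PySem.Set.ofList sl).contains x = true := by
    simp [PySem.Set.mem_ofList, hx]
  unfold gmceBStep
  rw [hc]; simp only [if_true]
  split_ifs with h
  · rw [max_eq_right (le_of_lt h)]
  · rw [max_eq_left (not_lt.mp h)]

theorem gmce_step_mem_none (sl : List Int) (x : Int) (hx : x ∈ sl) :
    gmceBStep (PySem.Set.ofList sl) none x = some x := by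
  have hc : (PySem.Set.ofList sl).contains x = true := by
    simp [PySem.Set.mem_ofList, hx]
  unfold gmceBStep
  rw [hc]; simp

-- B's fold, once started (best = some m), computes the max over the filtered tail
theorem gmce_b_some (sl : List Int) :
    ∀ (fl : List Int) (m : Int),
      fl.foldl (gmceBStep (PySem.Set.ofList sl)) (some m)
        = some ((fl.filter (fun e => decide (e ∈ sl))).foldl max m) := by
  intro fl
  induction fl with
  | nil => intro m; rfl
  | cons x t ih =>
    intro m
    rw [List.foldl_cons]
    by_cases hx : x ∈ sl
    · rw [gmce_step_mem_some sl x hx m, ih, List.filter_cons_of_pos (by simpa), List.foldl_cons]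
    · rw [gmce_step_notmem sl x hx, ih, List.filter_cons_of_neg (by simpa)]

-- B's fold from none: none iff no common element, else max of the filtered list
theorem gmce_b_none (sl : List Int) :
    ∀ (fl : List Int),
      fl.foldl (gmceBStep (PySem.Set.ofList sl)) none
        = (match fl.filter (fun e => decide (e ∈ sl)) with
           | [] => none
           | c :: t => some (t.foldl max c)) := by
  intro fl
  induction fl with
  | nil => rfl
  | cons x t ih =>
    rw [List.foldl_cons]
    by_cases hx : x ∈ sl
    · rw [gmce_step_mem_none sl x hx, gmce_b_some, List.filter_cons_of_pos (by simpa)]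
    · rw [gmce_step_notmem sl x hx, ih, List.filter_cons_of_neg (by simpa)]

theorem gmce_len_swap (l : List Int) (i j : Nat) : (gmceSwapStep l i j).length = l.length := by
  unfold gmceSwapStep; split <;> simp

-- a swap at positions i ≠ 0, j ≠ 0 leaves element 0 unchanged
theorem gmce_getD0_swap (l : List Int) (i j : Nat) (hi : i ≠ 0) (hj : j ≠ 0) :
    (gmceSwapStep l i j).getD 0 0 = l.getD 0 0 := by
  unfold gmceSwapStep
  split
  · simp [List.getD_eq_getElem?_getD, List.getElem?_set_ne (by omega : j ≠ 0),
      List.getElem?_set_ne (by omega : i ≠ 0)]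
  · rfl

-- an inner pass at row i ≥ 1 leaves element 0 unchanged
theorem gmce_getD0_inner (i : Nat) (hi : i ≠ 0) :
    ∀ (js : List Nat), (∀ j ∈ js, j ≠ 0) → ∀ (l : List Int),
      (js.foldl (fun l j => gmceSwapStep l i j) l).getD 0 0 = l.getD 0 0 := by
  intro js
  induction js with
  | nil => intro _ l; rfl
  | cons j t ih =>
    intro h l
    rw [List.foldl_cons, ih (fun j' hj' => h j' (List.mem_cons_of_mem _ hj')),
      gmce_getD0_swap l i j hi (h j (List.mem_cons_self))]

-- the inner pass at row 0 collects the max of the visited positions into element 0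
theorem gmce_inner0_max :
    ∀ (js : List Nat), js.Nodup →
      ∀ (l : List Int), (∀ j ∈ js, 0 < j ∧ j < l.length) →
      (js.foldl (fun l j => gmceSwapStep l 0 j) l).getD 0 0
        = js.foldl (fun m j => max m (l.getD j 0)) (l.getD 0 0) := by
  intro js
  induction js with
  | nil => intro _ l _; rfl
  | cons j t ih =>
    intro hnd l hb
    have hjpos : 0 < j := (hb j List.mem_cons_self).1
    have hjlt : j < l.length := (hb j List.mem_cons_self).2
    have h0lt : 0 < l.length := lt_of_le_of_lt (Nat.zero_le j) hjlt
    set l' := gmceSwapStep l 0 j with hl'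
    have hlen : l'.length = l.length := gmce_len_swap l 0 j
    -- element 0 of l' is the max so far
    have h0 : l'.getD 0 0 = max (l.getD 0 0) (l.getD j 0) := by
      rw [hl']; unfold gmceSwapStep
      split
      · rename_i hlt
        rw [max_eq_right (le_of_lt hlt)]
        simp [List.getD_eq_getElem?_getD, h0lt]
        rw [List.getElem_set_ne (by omega), List.getElem_set_self]
      · rename_i hge
        rw [max_eq_left (not_lt.mp hge)]
    -- positions not yet visited are unchanged
    have hrest : ∀ j' ∈ t, l'.getD j' 0 = l.getD j' 0 := by
      intro j' hj'
      have hne : j' ≠ j := fun h => (List.nodup_cons.mp hnd).1 (h ▸ hj')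
      have hne0 : j' ≠ 0 := by
        have := (hb j' (List.mem_cons_of_mem _ hj')).1; omega
      rw [hl']; unfold gmceSwapStep
      split
      · simp [List.getD_eq_getElem?_getD,
          List.getElem?_set_ne (fun h => hne h.symm),
          List.getElem?_set_ne (fun h => hne0 h.symm)]
      · rfl
    rw [List.foldl_cons, ih (List.nodup_cons.mp hnd).2 l'
        (fun j' hj' => by
          have := hb j' (List.mem_cons_of_mem _ hj')
          exact ⟨this.1, hlen ▸ this.2⟩),
      List.foldl_cons, ← h0]
    exact PySem.List.foldl_congr_mem t _ _ _ (fun m j' hj' => by rw [hrest j' hj'])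

-- folding max over lookups at range' k … equals folding max over the dropped list
theorem gmce_range_max :
    ∀ (n : Nat) (l : List Int) (k : Nat) (a : Int), k + n = l.length →
      (List.range' k n).foldl (fun m j => max m (l.getD j 0)) a = (l.drop k).foldl max a := by
  intro n
  induction n with
  | zero =>
    intro l k a hk
    simp [List.drop_eq_nil_of_le (by omega : l.length ≤ k)]
  | succ n ih =>
    intro l k a hk
    have hk' : k < l.length := by omega
    rw [List.range'_succ, List.foldl_cons,
      List.drop_eq_getElem_cons hk', List.foldl_cons,
      List.getD_eq_getElem?_getD, List.getElem?_eq_getElem hk']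
    exact ih l (k + 1) _ (by omega)

-- A's double loop leaves the max of the whole list in position 0
theorem gmce_selection_head (c : Int) (t : List Int) :
    ((List.range (c :: t).length).foldl
      (fun l i => (List.range' (i+1) ((c :: t).length - (i+1))).foldl (fun l j => gmceSwapStep l i j) l)
      (c :: t)).getD 0 0 = t.foldl max c := by
  set cs : List Int := c :: t with hcs
  have hn : cs.length = t.length + 1 := by simp [hcs]
  have hrange : List.range cs.length = 0 :: List.range' 1 t.length := by
    rw [hn, List.range_eq_range', List.range'_succ]
  rw [hrange, List.foldl_cons]
  -- the remaining rows (i ≥ 1) do not touch element 0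
  have hpres : ∀ (is : List Nat), (∀ i ∈ is, i ≠ 0) → ∀ (l : List Int),
      (is.foldl (fun l i => (List.range' (i+1) (cs.length - (i+1))).foldl (fun l j => gmceSwapStep l i j) l) l).getD 0 0
        = l.getD 0 0 := by
    intro is
    induction is with
    | nil => intro _ l; rfl
    | cons i t' ih =>
      intro h l
      rw [List.foldl_cons, ih (fun i' hi' => h i' (List.mem_cons_of_mem _ hi'))]
      exact gmce_getD0_inner i (h i List.mem_cons_self) _
        (fun j hj => by
          have := List.mem_range'.mp hj; omega) l
  rw [hpres _ (fun i hi => by have := List.mem_range'.mp hi; omega)]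
  -- the first row (i = 0) collects the max into element 0
  have h0 : (0 : Nat) + 1 = 1 := rfl
  have : cs.length - 1 = t.length := by omega
  rw [h0, this]
  rw [gmce_inner0_max (List.range' 1 t.length)
      (List.nodup_range' )
      cs
      (fun j hj => by have := List.mem_range'.mp hj; omega)]
  rw [gmce_range_max t.length cs 1 _ (by omega)]
  simp [hcs]

-- ===== VERDICT (by name: the statement is the Claim_ definition above) =====
theorem get_max_common_element_spec : Claim_equal_get_max_common_element := by
  intro fl sl _ hpre
  obtain ⟨hfl, hsl, x, hxf, hxs⟩ := hpre
  unfold Spec_get_max_common_element get_max_common_element get_max_common_element_alt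
  have hguard : ¬(fl = [] ∨ sl = []) := by
    rintro (h | h) <;> [exact hfl h; exact hsl h]
  simp only [hguard, if_false]
  rw [gmce_filter sl fl [], List.nil_append, gmce_b_none sl fl]
  have hne : fl.filter (fun e => decide (e ∈ sl)) ≠ [] := by
    intro h
    have : x ∈ fl.filter (fun e => decide (e ∈ sl)) := by
      simp [List.mem_filter, hxf, hxs]
    rw [h] at this; exact List.not_mem_nil this
  obtain ⟨c, t, hct⟩ := List.exists_cons_of_ne_nil hne
  rw [hct]
  simp only [if_neg (by simp : (c :: t : List Int) ≠ [])]
  exact gmce_selection_head c t
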